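-- pv_equiv track=rewrite | github.com/Haroong/Algorithm | BaekJoon Online Judge/Silver/1652-누울 자리를 찾아라.py | calculate_row
-- ===== SOURCE A (Python) =====
-- STREAK_EMPTY_ZONE = 2
--
-- def calculate_row(room):
--     row = 0
--
--     for i in range(len(room)):
--         count = 0
--         found_sleep_zone = True
--
--         for index, value in enumerate(room):
--             if room[i][index] == '.': # 빈 영역
--                 if found_sleep_zone:
--                     count += 1
--                     if count == STREAK_EMPTY_ZONE: # 가로로 눕기 가능
--                         row += 1
--                         count = 0
--                         found_sleep_zone = False # 다음번 장애물이 나타날 때 까지 카운트 x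
--                 else:
--                     continue
--             else: # 벽
--                 count = 0
--                 found_sleep_zone = True
--
--     return row
-- ===== SOURCE B (Python) =====
-- def calculate_row(room):
--     n = len(room)
--     total = 0
--     for i in range(n):
--         runs = []
--         length = 0
--         for j in range(n):
--             if room[i][j] == '.':
--                 length += 1
--             else:
--                 runs.append(length)
--                 length = 0
--         runs.append(length)
--         total += sum(1 for L in runs if L >= 2)
--     return total
-- ===== Notes on version B (the rewrite author's own statement) =====
-- stated objective: alternative
-- what changed: B replaces A's count/found flag state machine by collecting the lengths of the maximal dot-runs of each row and then counting those of length >= 2.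
import Mathlib
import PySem

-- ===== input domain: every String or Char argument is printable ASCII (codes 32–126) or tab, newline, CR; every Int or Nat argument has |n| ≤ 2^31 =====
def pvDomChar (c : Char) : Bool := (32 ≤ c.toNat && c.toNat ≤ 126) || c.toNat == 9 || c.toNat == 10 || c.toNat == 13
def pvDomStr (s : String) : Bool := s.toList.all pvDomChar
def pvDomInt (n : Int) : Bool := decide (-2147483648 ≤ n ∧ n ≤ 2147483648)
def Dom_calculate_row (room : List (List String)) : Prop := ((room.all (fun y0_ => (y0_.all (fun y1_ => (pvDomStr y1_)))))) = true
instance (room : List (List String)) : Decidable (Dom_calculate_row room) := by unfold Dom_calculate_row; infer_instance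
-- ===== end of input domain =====

-- B replaces A's count/found flag machine by collecting each row's maximal dot-run
-- lengths and counting those of length >= 2 (same cost, different decomposition).


-- ===== PORT A =====
-- literal transliteration of Source A: outer loop over range(len(room)); inner loop
-- over enumerate(room) maintaining (row, count, found_sleep_zone).
def calculate_row (room : List (List String)) : Int :=
  (List.range room.length).foldl (fun row i =>
    ((List.range room.length).foldl (fun (s : Int × Int × Bool) index =>
      if (room.getD i []).getD index "" = "." then
        if s.2.2 then
          if s.2.1 + 1 = 2 then (s.1 + 1, 0, false)
          else (s.1, s.2.1 + 1, s.2.2)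
        else s
      else (s.1, 0, true)) (row, (0 : Int), true)).1) 0

-- ===== PORT B =====
-- literal transliteration of Source B: per row, collect the run lengths (runs, length),
-- then count the runs of length >= 2.
def calculate_row_alt (room : List (List String)) : Int :=
  (List.range room.length).foldl (fun total i =>
    let st := (List.range room.length).foldl (fun (s : List Int × Int) j =>
      if (room.getD i []).getD j "" = "." then (s.1, s.2 + 1)
      else (s.1 ++ [s.2], 0)) (([] : List Int), (0 : Int))
    let runs := st.1 ++ [st.2]
    total + ((runs.filter (fun L => L ≥ 2)).length : Int)) 0

-- ===== PRECONDITION & SPEC =====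
-- Pre_ excludes exactly the inputs where A raises IndexError: a row shorter than
-- the number of rows (both programs index room[i][j] for j < len(room)).
def Pre_calculate_row (room : List (List String)) : Prop :=
  ∀ r ∈ room, room.length ≤ r.length
instance (room : List (List String)) : Decidable (Pre_calculate_row room) := by
  unfold Pre_calculate_row; infer_instance
def pvWitness_calculate_row : List (List String) := [[".", "."], [".", "#"]]

def Spec_calculate_row (room : List (List String)) (out : Int) : Prop := out = calculate_row_alt room
instance (room : List (List String)) (out : Int) : Decidable (Spec_calculate_row room out) := by unfold Spec_calculate_row; infer_instance

-- ===== CLAIM (what is proved, stated in full; the proofs are below) =====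
def Claim_equal_calculate_row : Prop := ∀ (room : List (List String)), Dom_calculate_row room → Pre_calculate_row room → Spec_calculate_row room (calculate_row room)

-- ===== LEMMAS AND PROOFS =====

-- Key invariant: over any index list, A's (row, count, found) state machine and
-- B's (runs, length) run collector stay in lockstep.
theorem pv_inner_key (cell : Nat → String) (is : List Nat) :
    ∀ (total : Int) (runs : List Int) (len : Int), 0 ≤ len →
    (is.foldl (fun (s : Int × Int × Bool) index =>
      if cell index = "." then
        if s.2.2 then
          if s.2.1 + 1 = 2 then (s.1 + 1, 0, false)
          else (s.1, s.2.1 + 1, s.2.2)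
        else s
      else (s.1, 0, true))
      (total + ((runs.filter (fun L => L ≥ 2)).length : Int) + (if len ≥ 2 then 1 else 0),
       if len ≥ 2 then 0 else len,
       if len ≥ 2 then false else true)).1
    =
    (let st := is.foldl (fun (s : List Int × Int) j =>
        if cell j = "." then (s.1, s.2 + 1)
        else (s.1 ++ [s.2], 0)) ((runs, len));
     total + (((st.1 ++ [st.2]).filter (fun L => L ≥ 2)).length : Int)) := by
  induction is with
  | nil =>
    intro total runs len hlen
    by_cases h2 : len ≥ 2 <;> simp [h2, List.filter_append] <;> omega
  | cons j is ih =>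
    intro total runs len hlen
    simp only [List.foldl_cons]
    by_cases hc : cell j = "."
    · by_cases h2 : len ≥ 2
      · have h2' : len + 1 ≥ 2 := by omega
        simpa [hc, h2, h2'] using ih total runs (len + 1) (by omega)
      · by_cases h1 : len = 1
        · simpa [hc, h2, h1] using ih total runs 2 (by omega)
        · have h0 : len = 0 := by omega
          simpa [hc, h2, h0] using ih total runs 1 (by omega)
    · have hF : total + ((runs.filter (fun L => L ≥ 2)).length : Int) + (if len ≥ 2 then 1 else 0)
          = total + (((runs ++ [len]).filter (fun L => L ≥ 2)).length : Int) + (if (0:Int) ≥ 2 then 1 else 0) := by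
        by_cases h2 : len ≥ 2 <;> simp [h2, List.filter_append] <;> omega
      simpa [hc, hF] using ih total (runs ++ [len]) 0 (by omega)

-- Per-row form: A's inner scan from the fresh state equals B's run collection.
theorem pv_row_eq (cell : Nat → String) (is : List Nat) (acc : Int) :
    (is.foldl (fun (s : Int × Int × Bool) index =>
      if cell index = "." then
        if s.2.2 then
          if s.2.1 + 1 = 2 then (s.1 + 1, 0, false)
          else (s.1, s.2.1 + 1, s.2.2)
        else s
      else (s.1, 0, true)) (acc, (0 : Int), true)).1
    =
    (let st := is.foldl (fun (s : List Int × Int) j =>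
        if cell j = "." then (s.1, s.2 + 1)
        else (s.1 ++ [s.2], 0)) (([] : List Int), (0 : Int));
     let runs := st.1 ++ [st.2]
     acc + ((runs.filter (fun L => L ≥ 2)).length : Int)) := by
  simpa using pv_inner_key cell is acc [] 0 (by omega)

-- foldl respects pointwise-equal step functions.
theorem pv_foldl_ext {α : Type} (f g : Int → α → Int) (h : ∀ a i, f a i = g a i) :
    ∀ (l : List α) (a : Int), l.foldl f a = l.foldl g a := by
  intro l
  induction l with
  | nil => intro a; rfl
  | cons x xs ih => intro a; simp only [List.foldl_cons, h, ih]

-- ===== VERDICT (by name: the statement is the Claim_ definition above) =====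
theorem calculate_row_spec : Claim_equal_calculate_row := by
  intro room _ _
  unfold Spec_calculate_row calculate_row calculate_row_alt
  exact pv_foldl_ext _ _
    (fun acc i => pv_row_eq (fun j => (room.getD i []).getD j "") (List.range room.length) acc)
    (List.range room.length) 0
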